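-- pv_equiv track=rewrite | github.com/Domiko7/competitive-programming | practice/logia/L19/etap_2_G/3.py | stp
-- ===== SOURCE A (Python) =====
-- def stp(n):
--
--     translator = {
--         "Z": 0,
--         "J": 1,
--         "D": 2,
--         "T": 3
--     }
--
--     def recursion(n, i=0):
--         if i >= len(n):
--             return 0, i
--
--         branches = translator[n[i]]
--         next = i + 1
--
--         depth = 0
--         for _ in range(branches):
--             old_depth, next = recursion(n, next)
--             depth = max(depth, old_depth)
--
--         return 1 + depth, next
--
--     return recursion(n)[0]
-- ===== SOURCE B (Python) =====
-- def stp(n):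
--     translator = {
--         "Z": 0,
--         "J": 1,
--         "D": 2,
--         "T": 3
--     }
--
--     best = 0
--     stack = []          # pending-children counts of the current node's ancestors (root's chain)
--     i = 0
--     done = False
--     while i < len(n) and not done:
--         arity = translator[n[i]]
--         depth = len(stack) + 1
--         if depth > best:
--             best = depth
--         if arity > 0:
--             stack.append(arity)
--         else:
--             # a leaf closes a chain of completed ancestors
--             while stack:
--                 stack[-1] -= 1
--                 if stack[-1] == 0:
--                     stack.pop()
--                 else:
--                     break
--             if not stack:
--                 done = True     # root subtree complete: trailing chars are never read
--         i += 1
--     return best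
-- ===== Notes on version B (the rewrite author's own statement) =====
-- stated objective: alternative
-- what changed: A parses the prefix code by nested recursion (one recursive call per subtree, a loop over the children); B replaces it with a single iterative left-to-right scan keeping an explicit stack of pending-children counts and a running maximum of len(stack)+1, stopping when the root subtree is complete.
import Mathlib
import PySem

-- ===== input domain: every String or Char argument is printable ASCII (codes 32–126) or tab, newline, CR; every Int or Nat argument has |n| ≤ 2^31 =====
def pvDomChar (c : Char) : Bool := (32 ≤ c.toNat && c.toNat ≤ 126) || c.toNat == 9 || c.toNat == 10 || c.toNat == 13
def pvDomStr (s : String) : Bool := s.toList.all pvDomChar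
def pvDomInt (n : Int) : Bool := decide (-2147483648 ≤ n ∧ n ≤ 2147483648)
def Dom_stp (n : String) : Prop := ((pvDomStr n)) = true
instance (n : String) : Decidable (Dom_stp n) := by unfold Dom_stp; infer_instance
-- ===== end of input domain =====

-- B replaces A's nested recursion by a single left-to-right scan with an explicit stack of
-- pending-children counts (objective: alternative, no recursion; same letter→arity map).

-- ===== PORT A =====
def stpTranslator : PySem.Dict String Int :=
  PySem.Dict.ofList [("Z", 0), ("J", 1), ("D", 2), ("T", 3)]

mutual
  -- `recursion(n, i)` of A.  Python's unbounded recursion is given explicit fuel; fuel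
  -- s.length + 1 - i is always sufficient (proved in stpS), so the `none` of fuel 0 is
  -- never the value of the port as called by `stp`; the other `none` is Python's KeyError.
  def stpRec (s : List Char) : Nat → Nat → Option (Int × Nat)
    | 0, _ => none
    | fuel + 1, i =>
      if _h : s.length ≤ i then some (0, i)
      else
        match PySem.Dict.get? stpTranslator (String.ofList [s[i]'(by omega)]) with
        | none => none                                   -- KeyError: translator[n[i]]
        | some branches =>
          match stpLoop s fuel branches.toNat (0, i + 1) with
          | none => none
          | some (depth, nxt) => some (1 + depth, nxt)
  termination_by fuel i => (fuel, 0)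

  -- `for _ in range(branches): old_depth, next = recursion(n, next); depth = max(depth, old_depth)`
  def stpLoop (s : List Char) : Nat → Nat → Int × Nat → Option (Int × Nat)
    | _, 0, st => some st
    | fuel, k + 1, (depth, nxt) =>
      match stpRec s fuel nxt with
      | none => none
      | some (old, nxt') => stpLoop s fuel k (max depth old, nxt')
  termination_by fuel k _ => (fuel, k + 1)
end

def stp (n : String) : Int :=
  match stpRec n.toList (n.toList.length + 1) 0 with
  | some (d, _) => d
  | none => 0                                            -- KeyError: outside Pre_stp

-- ===== PORT B =====
def stpTranslatorAlt : PySem.Dict String Int :=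
  PySem.Dict.ofList [("Z", 0), ("J", 1), ("D", 2), ("T", 3)]

-- a leaf closes a chain of completed ancestors: decrement the top count, pop exhausted ones
def stpPop : List Int → List Int
  | [] => []
  | t :: rest => if t - 1 = 0 then stpPop rest else (t - 1) :: rest

def stpGo (best : Int) (stack : List Int) : List Char → Int
  | [] => best
  | c :: rest =>
    match PySem.Dict.get? stpTranslatorAlt (String.ofList [c]) with
    | none => best                                       -- KeyError in Python B: outside Pre_stp
    | some a =>
      let d : Int := stack.length + 1
      let best' := if d > best then d else best
      if a > 0 then stpGo best' (a :: stack) rest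
      else
        match stpPop stack with
        | [] => best'                                    -- root subtree complete: stop scanning
        | t :: s' => stpGo best' (t :: s') rest

def stp_alt (n : String) : Int := stpGo 0 [] n.toList

-- ===== PRECONDITION & SPEC =====
-- spec-side arity table (not used by either port)
def stpArity? (c : Char) : Option Int :=
  if c = 'Z' then some 0 else if c = 'J' then some 1
  else if c = 'D' then some 2 else if c = 'T' then some 3 else none

def stpAr (c : Char) : Int := (stpArity? c).getD 0

-- 1 + Σ_{j<k} (arity(s j) - 1): the number of tree nodes still pending after reading k chars;
-- A reads position i exactly when this count is still positive on every prefix up to i.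
def stpBal (s : List Char) (k : Nat) : Int :=
  1 + ((s.take k).map (fun c => stpAr c - 1)).sum

-- Pre_stp excludes exactly the inputs where A raises KeyError: some position that the parse
-- actually reads (all pending-node counts before it positive) holds a letter outside ZJDT.
def Pre_stp (n : String) : Prop :=
  ∀ i (h : i < n.toList.length),
    (∀ k, k ≤ i → 0 < stpBal n.toList k) → (stpArity? (n.toList[i]'h)).isSome = true
instance (n : String) : Decidable (Pre_stp n) := by unfold Pre_stp; infer_instance

def pvWitness_stp : String := "DZJZ"

def Spec_stp (n : String) (out : Int) : Prop := out = stp_alt n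
instance (n : String) (out : Int) : Decidable (Spec_stp n out) := by unfold Spec_stp; infer_instance

-- ===== CLAIM (what is proved, stated in full; the proofs are below) =====
def Claim_equal_stp : Prop := ∀ (n : String), Dom_stp n → Pre_stp n → Spec_stp n (stp n)

-- ===== LEMMAS AND PROOFS =====

theorem stpTranslator_get (c : Char) :
    PySem.Dict.get? stpTranslator (String.ofList [c]) = stpArity? c := by
  by_cases hz : c = 'Z'; · subst hz; decide
  by_cases hj : c = 'J'; · subst hj; decide
  by_cases hd : c = 'D'; · subst hd; decide
  by_cases ht : c = 'T'; · subst ht; decide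
  have h : stpTranslator = PySem.Dict.mk [("Z",0),("J",1),("D",2),("T",3)] := by decide
  rw [h]
  simp [PySem.Dict.get?_mk_cons, stpArity?, hz, hj, hd, ht, String.ext_iff]
  simp [PySem.Dict.get?, Ne.symm hz, Ne.symm hj, Ne.symm hd, Ne.symm ht]

theorem stpArity?_bounds {c : Char} {a : Int} (h : stpArity? c = some a) : 0 ≤ a ∧ a ≤ 3 := by
  unfold stpArity? at h; split_ifs at h <;> (injection h with h; omega)

theorem stpBal_zero (s : List Char) : stpBal s 0 = 1 := by simp [stpBal]

theorem stpBal_succ (s : List Char) (i : Nat) (h : i < s.length) :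
    stpBal s (i + 1) = stpBal s i + (stpAr (s[i]) - 1) := by
  unfold stpBal
  rw [List.take_add_one, List.getElem?_eq_getElem h]
  simp only [Option.toList_some, List.map_append, List.sum_append, List.map_cons, List.map_nil,
    List.sum_cons, List.sum_nil]
  omega

theorem ifmax (a c : Int) : (if c > a then c else a) = max a c := by
  rw [max_def]; split_ifs <;> omega

theorem stpTranslatorAlt_get (c : Char) :
    PySem.Dict.get? stpTranslatorAlt (String.ofList [c]) = stpArity? c := by
  have h : stpTranslatorAlt = stpTranslator := by decide
  rw [h]; exact stpTranslator_get c

theorem stpGo_cons_some {c : Char} {a best : Int} {stack : List Int} {rest : List Char}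
    (h : stpArity? c = some a) :
    stpGo best stack (c :: rest) =
      if a > 0 then
        stpGo (if (stack.length : Int) + 1 > best then (stack.length : Int) + 1 else best)
          (a :: stack) rest
      else
        match stpPop stack with
        | [] => (if (stack.length : Int) + 1 > best then (stack.length : Int) + 1 else best)
        | t :: s' =>
          stpGo (if (stack.length : Int) + 1 > best then (stack.length : Int) + 1 else best)
            (t :: s') rest := by
  simp only [stpGo, stpTranslatorAlt_get, h]

-- ----- equality of the two machines, given that A's parse succeeds -----

theorem stpELoop (s : List Char) (fuel : Nat)
    (HE : ∀ i d nxt, stpRec s fuel i = some (d, nxt) → i < s.length →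
      1 ≤ d ∧ i < nxt ∧ nxt ≤ s.length ∧
      ∀ (st : List Int) (b : Int),
        stpGo b st (s.drop i) =
          (match stpPop st with
           | [] => max b ((st.length : Int) + d)
           | t :: s' => stpGo (max b ((st.length : Int) + d)) (t :: s') (s.drop nxt))) :
    ∀ k dep i dd nxt, 1 ≤ k → stpLoop s fuel k (dep, i) = some (dd, nxt) →
      i ≤ s.length → 0 ≤ dep →
      dep ≤ dd ∧ i ≤ nxt ∧ nxt ≤ s.length ∧
      ∀ (st : List Int) (b : Int), (st.length : Int) + 1 + dep ≤ b →
        stpGo b ((k : Int) :: st) (s.drop i) =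
          (match stpPop st with
           | [] => max b ((st.length : Int) + 1 + dd)
           | t :: s' => stpGo (max b ((st.length : Int) + 1 + dd)) (t :: s') (s.drop nxt)) := by
  intro k
  induction k with
  | zero => intro dep i dd nxt hk; exact absurd hk (by omega)
  | succ k ihk =>
    intro dep i dd nxt _ hloop hi hdep
    simp only [stpLoop] at hloop
    rcases Nat.lt_or_ge i s.length with hilt | hige
    · cases hrec : stpRec s fuel i with
      | none => rw [hrec] at hloop; simp at hloop
      | some pr =>
        obtain ⟨o, n1⟩ := pr
        rw [hrec] at hloop
        replace hloop : stpLoop s fuel k (max dep o, n1) = some (dd, nxt) := hloop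
        obtain ⟨ho1, hin1, hn1len, Heq⟩ := HE i o n1 hrec hilt
        by_cases hk0 : k = 0
        · subst hk0
          simp only [stpLoop, Option.some.injEq, Prod.mk.injEq] at hloop
          obtain ⟨hdd, hnxt⟩ := hloop
          refine ⟨by omega, by omega, by omega, ?_⟩
          intro st b hb
          have hc : ((0 + 1 : Nat) : Int) = 1 := by norm_num
          rw [hc]
          have hE := Heq ((1 : Int) :: st) b
          simp only [stpPop, List.length_cons] at hE
          norm_num at hE
          rw [hE]
          have hm : max b ((st.length : Int) + 1 + o) = max b ((st.length : Int) + 1 + dd) := by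
            omega
          cases hpop : stpPop st with
          | nil => simp only []; omega
          | cons t s' => simp only []; rw [hm, hnxt]
        · obtain ⟨hdd, hn1nxt, hnxtlen, HeqI⟩ :=
            ihk (max dep o) n1 dd nxt (by omega) hloop (by omega) (by omega)
          refine ⟨by omega, by omega, by omega, ?_⟩
          intro st b hb
          have hE := Heq (((k + 1 : Nat) : Int) :: st) b
          have hkpos : ¬ ((k + 1 : Nat) : Int) - 1 = 0 := by push_cast; omega
          simp only [stpPop, List.length_cons, hkpos, if_false] at hE
          push_cast at hE ⊢
          rw [hE]
          have hkk : ((k : Int) + 1 - 1) = (k : Int) := by ring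
          rw [hkk]
          have hb' : (st.length : Int) + 1 + max dep o ≤ max b ((st.length : Int) + 1 + o) := by
            omega
          have hI := HeqI st (max b ((st.length : Int) + 1 + o)) hb'
          push_cast at hI
          rw [hI]
          have hm : max (max b ((st.length : Int) + 1 + o)) ((st.length : Int) + 1 + dd)
              = max b ((st.length : Int) + 1 + dd) := by omega
          cases hpop : stpPop st with
          | nil => simp only []; omega
          | cons t s' => simp only []; rw [hm]
    · have hieq : i = s.length := by omega
      cases fuel with
      | zero => simp [stpRec] at hloop
      | succ fuel' =>
        have hrec : stpRec s (fuel' + 1) i = some (0, i) := by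
          simp only [stpRec]; rw [dif_pos (by omega : s.length ≤ i)]
        rw [hrec] at hloop
        replace hloop : stpLoop s (fuel' + 1) k (max dep 0, i) = some (dd, nxt) := hloop
        rw [max_eq_left hdep] at hloop
        have hdropnil : s.drop i = [] := by rw [hieq]; simp
        by_cases hk0 : k = 0
        · subst hk0
          simp only [stpLoop, Option.some.injEq, Prod.mk.injEq] at hloop
          obtain ⟨hdd, hnxt⟩ := hloop
          refine ⟨by omega, by omega, by omega, ?_⟩
          intro st b hb
          rw [hdropnil, ← hnxt, hdropnil]
          simp only [stpGo]
          cases hpop : stpPop st with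
          | nil => simp only []; rw [max_eq_left (by omega)]
          | cons t s' => simp only []; rw [max_eq_left (by omega)]
        · obtain ⟨hdd, hin, hnl, HeqI⟩ :=
            ihk dep i dd nxt (by omega) hloop hi hdep
          refine ⟨hdd, hin, hnl, ?_⟩
          intro st b hb
          have hI := HeqI st b hb
          rw [hdropnil] at hI ⊢
          simp only [stpGo] at hI ⊢
          exact hI

theorem stpE (s : List Char) :
    ∀ fuel i d nxt, stpRec s fuel i = some (d, nxt) → i < s.length →
      1 ≤ d ∧ i < nxt ∧ nxt ≤ s.length ∧
      ∀ (st : List Int) (b : Int),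
        stpGo b st (s.drop i) =
          (match stpPop st with
           | [] => max b ((st.length : Int) + d)
           | t :: s' => stpGo (max b ((st.length : Int) + d)) (t :: s') (s.drop nxt)) := by
  intro fuel
  induction fuel with
  | zero => intro i d nxt hrec _; simp [stpRec] at hrec
  | succ fuel ih =>
    intro i d nxt hrec hi
    simp only [stpRec] at hrec
    rw [dif_neg (by omega : ¬ s.length ≤ i), stpTranslator_get] at hrec
    cases harr : stpArity? (s[i]'hi) with
    | none => rw [harr] at hrec; exact absurd hrec (by simp)
    | some a =>
      rw [harr] at hrec
      replace hrec : (match stpLoop s fuel a.toNat (0, i + 1) with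
        | none => none
        | some (depth, nxt) => some (1 + depth, nxt)) = some (d, nxt) := hrec
      obtain ⟨ha0, ha3⟩ := stpArity?_bounds harr
      have hdrop : s.drop i = s[i] :: s.drop (i + 1) := List.drop_eq_getElem_cons hi
      cases hloop : stpLoop s fuel a.toNat (0, i + 1) with
      | none => rw [hloop] at hrec; simp at hrec
      | some pr =>
        obtain ⟨dep0, nxt0⟩ := pr
        rw [hloop] at hrec
        simp only [Option.some.injEq, Prod.mk.injEq] at hrec
        obtain ⟨hd, hn⟩ := hrec
        by_cases hz : a.toNat = 0
        · have haz : a = 0 := by omega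
          subst haz
          have h00 : stpLoop s fuel ((0 : Int).toNat) (0, i + 1) = some (0, i + 1) := by
            simp [stpLoop]
          rw [h00] at hloop
          simp only [Option.some.injEq, Prod.mk.injEq] at hloop
          obtain ⟨hdep0, hnxt0⟩ := hloop
          refine ⟨by omega, by omega, by omega, ?_⟩
          intro st b
          rw [hdrop, stpGo_cons_some harr, if_neg (by omega : ¬ (0 : Int) > 0)]
          simp only [ifmax]
          cases hpop : stpPop st with
          | nil => simp only []; rw [← hd, ← hdep0]; norm_num
          | cons t s' =>
            simp only []
            have hm : max b ((st.length : Int) + 1) = max b ((st.length : Int) + d) := by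
              rw [← hd, ← hdep0]; norm_num
            rw [hm, ← hn, ← hnxt0]
        · have hge1 : 1 ≤ a.toNat := by omega
          obtain ⟨hdd0, hn1, hnl, HeqL⟩ :=
            stpELoop s fuel ih a.toNat 0 (i + 1) dep0 nxt0 hge1 hloop (by omega) (le_refl 0)
          refine ⟨by omega, by omega, by omega, ?_⟩
          intro st b
          rw [hdrop, stpGo_cons_some harr, if_pos (by omega : a > 0)]
          simp only [ifmax]
          have hacast : ((a.toNat : Nat) : Int) = a := by omega
          have hb' : (st.length : Int) + 1 + 0 ≤ max b ((st.length : Int) + 1) := by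
            have := le_max_right b ((st.length : Int) + 1); omega
          have hE := HeqL st (max b ((st.length : Int) + 1)) hb'
          rw [hacast] at hE
          rw [hE]
          have hm : max (max b ((st.length : Int) + 1)) ((st.length : Int) + 1 + dep0)
              = max b ((st.length : Int) + d) := by omega
          cases hpop : stpPop st with
          | nil => simp only []; omega
          | cons t s' => simp only []; rw [hm, ← hn]

-- ----- success of A's parse under Pre_ -----

theorem stpSLoop (s : List Char) (fuel : Nat)
    (HS : ∀ i, i ≤ s.length → s.length + 1 ≤ fuel + i →
      (i < s.length → ∀ k, k ≤ i → 0 < stpBal s k) →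
      ∃ d nxt, stpRec s fuel i = some (d, nxt) ∧ i ≤ nxt ∧ nxt ≤ s.length ∧
        (∀ m, i ≤ m → m < nxt → stpBal s i - 1 < stpBal s m) ∧
        (nxt = s.length ∨ stpBal s nxt = stpBal s i - 1)) :
    ∀ (k : Nat) (dep : Int) (i : Nat), i ≤ s.length → s.length + 1 ≤ fuel + i →
      (1 ≤ k → i < s.length → (∀ m, m ≤ i → 0 < stpBal s m) ∧ (k : Int) ≤ stpBal s i) →
      ∃ dd nxt, stpLoop s fuel k (dep, i) = some (dd, nxt) ∧ i ≤ nxt ∧ nxt ≤ s.length ∧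
        (∀ m, i ≤ m → m < nxt → stpBal s i - (k : Int) < stpBal s m) ∧
        (nxt = s.length ∨ stpBal s nxt = stpBal s i - (k : Int)) := by
  intro k
  induction k with
  | zero =>
    intro dep i hi _ _
    exact ⟨dep, i, by simp [stpLoop], le_refl _, hi, by intro m h1 h2; omega,
      Or.inr (by push_cast; omega)⟩
  | succ k ih =>
    intro dep i hi hfuel hinv
    obtain ⟨o, n1, hrec, hin1, hn1len, pos1, fin1⟩ :=
      HS i hi hfuel (fun hilt => (hinv (by omega) hilt).1)
    have hinv1 : 1 ≤ k → n1 < s.length →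
        (∀ m, m ≤ n1 → 0 < stpBal s m) ∧ (k : Int) ≤ stpBal s n1 := by
      intro hk hn1lt
      have hbn1 : stpBal s n1 = stpBal s i - 1 := by
        rcases fin1 with h | h; · omega
        · exact h
      have hilt : i < s.length := by omega
      obtain ⟨hpos, hki⟩ := hinv (by omega) hilt
      push_cast at hki
      constructor
      · intro m hm
        rcases Nat.lt_or_ge m (i + 1) with h | h
        · exact hpos m (by omega)
        · rcases Nat.lt_or_ge m n1 with h2 | h2
          · have := pos1 m (by omega) h2; omega
          · have hmn : m = n1 := by omega
            subst hmn; omega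
      · omega
    obtain ⟨dd, nxt, hloop2, hn1nxt, hnxtlen, pos2, fin2⟩ :=
      ih (max dep o) n1 hn1len (by omega) hinv1
    refine ⟨dd, nxt, ?_, by omega, hnxtlen, ?_, ?_⟩
    · simp only [stpLoop]
      rw [hrec]
      exact hloop2
    · intro m h1 h2
      push_cast
      rcases Nat.lt_or_ge m n1 with h | h
      · have := pos1 m h1 h; omega
      · have := pos2 m h h2
        push_cast at this
        rcases fin1 with he | he
        · omega
        · omega
    · rcases fin2 with he | he
      · exact Or.inl he
      · rcases fin1 with hf | hf
        · exact Or.inl (by omega)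
        · right; push_cast at he ⊢; omega

theorem stpS (s : List Char)
    (Hv : ∀ i (h : i < s.length),
      (∀ k, k ≤ i → 0 < stpBal s k) → (stpArity? (s[i]'h)).isSome = true) :
    ∀ fuel i, i ≤ s.length → s.length + 1 ≤ fuel + i →
      (i < s.length → ∀ k, k ≤ i → 0 < stpBal s k) →
      ∃ d nxt, stpRec s fuel i = some (d, nxt) ∧ i ≤ nxt ∧ nxt ≤ s.length ∧
        (∀ m, i ≤ m → m < nxt → stpBal s i - 1 < stpBal s m) ∧
        (nxt = s.length ∨ stpBal s nxt = stpBal s i - 1) := by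
  intro fuel
  induction fuel with
  | zero => intro i hi hf _; omega
  | succ fuel ih =>
    intro i hi hf hinv
    rcases Nat.lt_or_ge i s.length with hilt | hige
    · have harr : (stpArity? (s[i]'hilt)).isSome = true := Hv i hilt (hinv hilt)
      obtain ⟨a, ha⟩ := Option.isSome_iff_exists.mp harr
      obtain ⟨ha0, ha3⟩ := stpArity?_bounds ha
      have hsucc := stpBal_succ s i hilt
      have hAr : stpAr (s[i]) = a := by unfold stpAr; rw [ha]; rfl
      rw [hAr] at hsucc
      have hbi : 0 < stpBal s i := hinv hilt i (le_refl i)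
      have hinvk : 1 ≤ a.toNat → i + 1 < s.length →
          (∀ m, m ≤ i + 1 → 0 < stpBal s m) ∧ ((a.toNat : Nat) : Int) ≤ stpBal s (i + 1) := by
        intro hk _
        have hage : (1 : Int) ≤ a := by omega
        constructor
        · intro m hm
          rcases Nat.lt_or_ge m (i + 1) with h | h
          · exact hinv hilt m (by omega)
          · have : m = i + 1 := by omega
            subst this; omega
        · omega
      obtain ⟨dd, nxt, hloop, hn, hnl, pos2, fin2⟩ :=
        stpSLoop s fuel ih a.toNat 0 (i + 1) (by omega) (by omega) hinvk
      refine ⟨1 + dd, nxt, ?_, by omega, hnl, ?_, ?_⟩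
      · simp only [stpRec]
        rw [dif_neg (by omega : ¬ s.length ≤ i), stpTranslator_get]
        rw [ha]
        show (match stpLoop s fuel a.toNat (0, i + 1) with
              | none => none
              | some (depth, nxt) => some (1 + depth, nxt)) = some (1 + dd, nxt)
        rw [hloop]
      · intro m h1 h2
        rcases Nat.eq_or_lt_of_le h1 with h | h
        · rw [← h]; omega
        · have := pos2 m (by omega) h2
          push_cast at this
          omega
      · rcases fin2 with he | he
        · exact Or.inl he
        · right; omega
    · refine ⟨0, i, ?_, le_refl _, by omega, by intro m h1 h2; omega, Or.inl (by omega)⟩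
      simp only [stpRec]
      rw [dif_pos (by omega : s.length ≤ i)]

-- ===== VERDICT (by name: the statement is the Claim_ definition above) =====
theorem stp_spec : Claim_equal_stp := by
  unfold Claim_equal_stp
  intro n _hdom hpre
  unfold Spec_stp
  obtain ⟨d, nxt, hrec, -, -, -, -⟩ :=
    stpS n.toList hpre (n.toList.length + 1) 0 (by omega) (by omega)
      (fun _ k hk => by
        have : k = 0 := by omega
        subst this; rw [stpBal_zero]; omega)
  by_cases hlen : n.toList.length = 0
  · have hs : n.toList = [] := List.eq_nil_of_length_eq_zero hlen
    have : stp n = 0 := by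
      unfold stp
      rw [hs]
      simp [stpRec]
    rw [this]
    unfold stp_alt
    rw [hs]
    simp [stpGo]
  · have h0 : 0 < n.toList.length := by omega
    obtain ⟨hd1, -, -, Heq⟩ := stpE n.toList (n.toList.length + 1) 0 d nxt hrec h0
    have hB : stp_alt n = d := by
      unfold stp_alt
      have := Heq [] 0
      simp only [List.drop_zero] at this
      rw [this]
      simp [stpPop]
      omega
    have hA : stp n = d := by unfold stp; rw [hrec]
    rw [hA, hB]
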